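-- pv_equiv track=rewrite | github.com/rajat4493/AgentDevLabs | api/router/rule_based.py | _find_model_for_provider
-- ===== SOURCE A (Python) =====
-- from typing import Dict, Literal, Optional
--
-- PROVIDER_DEFAULT_MODELS: Dict[str, str] = {
--     "openai": "gpt-4o-mini",
--     "anthropic": "claude-3-opus-20240229",
--     "gemini": "gemini-2.0-flash",
--     "ollama": "qwen2:7b-instruct",
-- }
--
-- def _find_model_for_provider(
--     provider: str,
--     rules: Dict[str, Dict[str, Dict[str, str]]],
--     preferred_task: str,
--     preferred_band: str,
-- ) -> Optional[str]:
--     task_rules = rules.get(preferred_task, {})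
--     band_cfg = task_rules.get(preferred_band)
--     if band_cfg and band_cfg.get("provider") == provider:
--         return band_cfg.get("model")
--     for cfg in task_rules.values():
--         if cfg.get("provider") == provider:
--             return cfg.get("model")
--
--     # Look across other task types for a reasonable default.
--     for task_name, bands in rules.items():
--         if task_name == preferred_task:
--             continue
--         for cfg in bands.values():
--             if cfg.get("provider") == provider:
--                 return cfg.get("model")
--     return PROVIDER_DEFAULT_MODELS.get(provider)
-- ===== SOURCE B (Python) =====
-- from typing import Dict, Optional
--
-- PROVIDER_DEFAULT_MODELS: Dict[str, str] = {
--     "openai": "gpt-4o-mini",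
--     "anthropic": "claude-3-opus-20240229",
--     "gemini": "gemini-2.0-flash",
--     "ollama": "qwen2:7b-instruct",
-- }
--
-- def _find_model_for_provider(
--     provider: str,
--     rules: Dict[str, Dict[str, Dict[str, str]]],
--     preferred_task: str,
--     preferred_band: str,
-- ) -> Optional[str]:
--     # Single pass over every band config in data order, ranking each matching
--     # config (0 = preferred task+band, 1 = preferred task, 2 = other tasks) and
--     # keeping the best-ranked match seen first.
--     best_prio = 3
--     best_model = None
--     for task_name, bands in rules.items():
--         for band_name, cfg in bands.items():
--             if cfg.get("provider") != provider:
--                 continue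
--             if task_name == preferred_task:
--                 prio = 0 if band_name == preferred_band else 1
--             else:
--                 prio = 2
--             if prio < best_prio:
--                 best_prio = prio
--                 best_model = cfg.get("model")
--     if best_prio < 3:
--         return best_model
--     return PROVIDER_DEFAULT_MODELS.get(provider)
-- ===== Notes on version B (the rewrite author's own statement) =====
-- stated objective: alternative
-- what changed: Replaces A's three staged scans with early returns by a single pass over every band config in data order that ranks each matching config (0 = preferred task+band, 1 = preferred task, 2 = other tasks) and keeps the best-ranked first match in an accumulator; Pre_ only excludes duplicate-key association lists, which do not encode any Python dict.
import Mathlib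
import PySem

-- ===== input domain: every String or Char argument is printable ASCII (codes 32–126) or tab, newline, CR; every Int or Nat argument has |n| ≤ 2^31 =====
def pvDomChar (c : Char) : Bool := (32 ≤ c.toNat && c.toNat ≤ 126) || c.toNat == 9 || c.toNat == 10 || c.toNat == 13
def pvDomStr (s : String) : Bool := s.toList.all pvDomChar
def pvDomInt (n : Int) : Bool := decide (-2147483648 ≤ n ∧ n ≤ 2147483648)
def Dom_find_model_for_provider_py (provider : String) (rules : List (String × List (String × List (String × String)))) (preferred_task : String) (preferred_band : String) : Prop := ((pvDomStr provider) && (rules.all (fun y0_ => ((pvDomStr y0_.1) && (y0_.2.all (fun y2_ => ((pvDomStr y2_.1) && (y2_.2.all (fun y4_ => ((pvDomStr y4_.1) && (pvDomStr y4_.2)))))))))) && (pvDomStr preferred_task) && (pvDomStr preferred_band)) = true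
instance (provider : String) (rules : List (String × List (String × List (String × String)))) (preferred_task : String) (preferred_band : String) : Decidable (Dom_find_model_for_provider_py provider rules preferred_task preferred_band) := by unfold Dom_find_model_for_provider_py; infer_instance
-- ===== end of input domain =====

-- B replaces A's three staged scans-with-early-returns by ONE pass over every band
-- config in data order, ranking each matching config (0 = preferred task+band,
-- 1 = preferred task, 2 = other task) and keeping the best-ranked first match
-- (objective: alternative single-pass algorithm, same cost).

-- Dicts are association lists (first-match lookup = Python dict.get on unique keys).
def PROVIDER_DEFAULT_MODELS : List (String × String) :=
  [("openai", "gpt-4o-mini"), ("anthropic", "claude-3-opus-20240229"),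
   ("gemini", "gemini-2.0-flash"), ("ollama", "qwen2:7b-instruct")]

-- ===== PORT A =====
-- `for cfg in task_rules.values(): if cfg.get("provider") == provider: return cfg`
def pvScanBands (provider : String) : List (String × List (String × String)) → Option (List (String × String))
  | [] => none
  | (_, cfg) :: rest =>
      if List.lookup "provider" cfg == some provider then some cfg
      else pvScanBands provider rest

-- `for task_name, bands in rules.items(): if task_name == preferred_task: continue; <scan bands>`
def pvScanTasks (provider preferred_task : String) : List (String × List (String × List (String × String))) → Option (List (String × String))
  | [] => none
  | (task_name, bands) :: rest =>
      if task_name == preferred_task then pvScanTasks provider preferred_task rest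
      else
        match pvScanBands provider bands with
        | some cfg => some cfg
        | none => pvScanTasks provider preferred_task rest

-- the code after the first early return (the two fallback scans and the default)
def pvAfterBand (provider preferred_task : String) (rules : List (String × List (String × List (String × String)))) (task_rules : List (String × List (String × String))) : Option String :=
  match pvScanBands provider task_rules with
  | some cfg => List.lookup "model" cfg
  | none =>
      match pvScanTasks provider preferred_task rules with
      | some cfg => List.lookup "model" cfg
      | none => List.lookup provider PROVIDER_DEFAULT_MODELS

def find_model_for_provider_py (provider : String) (rules : List (String × List (String × List (String × String)))) (preferred_task : String) (preferred_band : String) : Option String :=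
  let task_rules := (List.lookup preferred_task rules).getD []
  let band_cfg := List.lookup preferred_band task_rules
  match band_cfg with
  | some bc =>
      -- `if band_cfg and band_cfg.get("provider") == provider:` (truthiness = nonempty dict)
      if bc ≠ [] ∧ List.lookup "provider" bc = some provider then List.lookup "model" bc
      else pvAfterBand provider preferred_task rules task_rules
  | none => pvAfterBand provider preferred_task rules task_rules

-- ===== PORT B =====
-- `prio = 0 if band_name == preferred_band else 1` (preferred task) / `prio = 2` (other)
def pvPrio (preferred_task preferred_band task_name band_name : String) : Nat :=
  if task_name == preferred_task then (if band_name == preferred_band then 0 else 1) else 2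

-- single pass with a (best_prio, best_model) accumulator; first match of each rank wins
def find_model_for_provider_py_alt (provider : String) (rules : List (String × List (String × List (String × String)))) (preferred_task : String) (preferred_band : String) : Option String :=
  let best := rules.foldl (fun acc tb =>
    tb.2.foldl (fun acc2 bc =>
      if List.lookup "provider" bc.2 == some provider then
        let prio := pvPrio preferred_task preferred_band tb.1 bc.1
        if prio < acc2.1 then (prio, List.lookup "model" bc.2) else acc2
      else acc2) acc) ((3 : Nat), (none : Option String))
  if best.1 < 3 then best.2 else List.lookup provider PROVIDER_DEFAULT_MODELS

-- ===== PRECONDITION & SPEC =====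
-- Pre_ requires the keys of each dict (task level and band level) to be pairwise
-- distinct; every Python dict satisfies this automatically, so Pre_ only excludes
-- duplicate-key association lists, which do not encode any Python input.
def Pre_find_model_for_provider_py (provider : String) (rules : List (String × List (String × List (String × String)))) (preferred_task : String) (preferred_band : String) : Prop :=
  (rules.map Prod.fst).Nodup ∧ ∀ tb ∈ rules, (tb.2.map Prod.fst).Nodup
instance (provider : String) (rules : List (String × List (String × List (String × String)))) (preferred_task : String) (preferred_band : String) : Decidable (Pre_find_model_for_provider_py provider rules preferred_task preferred_band) := by unfold Pre_find_model_for_provider_py; infer_instance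

def pvWitness_find_model_for_provider_py : String × (List (String × List (String × List (String × String)))) × String × String :=
  ("openai", [("chat", [("low", [("provider", "openai"), ("model", "gpt-4o-mini")])])], "chat", "low")

def Spec_find_model_for_provider_py (provider : String) (rules : List (String × List (String × List (String × String)))) (preferred_task : String) (preferred_band : String) (out : Option String) : Prop := out = find_model_for_provider_py_alt provider rules preferred_task preferred_band
instance (provider : String) (rules : List (String × List (String × List (String × String)))) (preferred_task : String) (preferred_band : String) (out : Option String) : Decidable (Spec_find_model_for_provider_py provider rules preferred_task preferred_band out) := by unfold Spec_find_model_for_provider_py; infer_instance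

-- ===== CLAIM (what is proved, stated in full; the proofs are below) =====
def Claim_equal_find_model_for_provider_py : Prop := ∀ (provider : String) (rules : List (String × List (String × List (String × String)))) (preferred_task : String) (preferred_band : String), Dom_find_model_for_provider_py provider rules preferred_task preferred_band → Pre_find_model_for_provider_py provider rules preferred_task preferred_band → Spec_find_model_for_provider_py provider rules preferred_task preferred_band (find_model_for_provider_py provider rules preferred_task preferred_band)

-- ===== LEMMAS AND PROOFS =====

-- proof-side abbreviations
def pvMatch (provider : String) (cfg : List (String × String)) : Bool :=
  List.lookup "provider" cfg == some provider

def pvModel (cfg : List (String × String)) : Option String := List.lookup "model" cfg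

def pvStep (acc e : Nat × Option String) : Nat × Option String := if e.1 < acc.1 then e else acc

-- the (priority, model) entries contributed by one task's bands
def pvEnt (provider preferred_task preferred_band task_name : String) (bands : List (String × List (String × String))) : List (Nat × Option String) :=
  bands.filterMap (fun bc => if pvMatch provider bc.2 then some (pvPrio preferred_task preferred_band task_name bc.1, pvModel bc.2) else none)

def pvL (provider preferred_task preferred_band : String) (rules : List (String × List (String × List (String × String)))) : List (Nat × Option String) :=
  rules.flatMap (fun tb => pvEnt provider preferred_task preferred_band tb.1 tb.2)

def pvF (i : Nat) (L : List (Nat × Option String)) : List (Nat × Option String) :=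
  L.filter (fun x => x.1 == i)

-- matching models of one task's bands
def pvGM (provider : String) (bands : List (String × List (String × String))) : List (Option String) :=
  bands.filterMap (fun bc => if pvMatch provider bc.2 then some (pvModel bc.2) else none)

-- candidate segments of A's staged scan
def pvC0 (preferred_band : String) (tr : List (String × List (String × String))) : List (List (String × String)) :=
  match List.lookup preferred_band tr with
  | some c => if c.isEmpty then [] else [c]
  | none => []

def pvC2 (preferred_task : String) (rules : List (String × List (String × List (String × String)))) : List (List (String × String)) :=
  (rules.filter (fun p => p.1 != preferred_task)).flatMap (fun p => p.2.map Prod.snd)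

theorem pvScanBands_eq_find? (provider : String) (l : List (String × List (String × String))) :
    pvScanBands provider l = (l.map Prod.snd).find? (pvMatch provider) := by
  induction l with
  | nil => rfl
  | cons hd tl ih =>
      obtain ⟨k, cfg⟩ := hd
      simp only [pvScanBands, List.map, List.find?, pvMatch]
      by_cases h : (List.lookup "provider" cfg == some provider) = true
      · simp [h]
      · simp only [Bool.not_eq_true] at h
        simp [h, ih]

theorem pvScanTasks_eq_find? (provider preferred_task : String) (l : List (String × List (String × List (String × String)))) :
    pvScanTasks provider preferred_task l =
      ((l.filter (fun p => p.1 != preferred_task)).flatMap (fun p => p.2.map Prod.snd)).find? (pvMatch provider) := by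
  induction l with
  | nil => rfl
  | cons hd tl ih =>
      obtain ⟨t, bands⟩ := hd
      by_cases h : t = preferred_task
      · simp [pvScanTasks, h, ih, List.filter]
      · have hb : (t == preferred_task) = false := by simp [h]
        have hb2 : (t != preferred_task) = true := by simp [bne, hb]
        simp only [pvScanTasks, hb, Bool.false_eq_true, if_false, ih,
          List.filter_cons, hb2, if_true, List.flatMap_cons, List.find?_append,
          pvScanBands_eq_find?]
        cases (bands.map Prod.snd).find? (pvMatch provider) <;> rfl

theorem pvAfterBand_eq (provider preferred_task : String) (rules : List (String × List (String × List (String × String)))) (task_rules : List (String × List (String × String))) :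
    pvAfterBand provider preferred_task rules task_rules =
      match (task_rules.map Prod.snd ++ pvC2 preferred_task rules).find? (pvMatch provider) with
      | some cfg => List.lookup "model" cfg
      | none => List.lookup provider PROVIDER_DEFAULT_MODELS := by
  simp only [pvAfterBand, pvC2, List.find?_append, pvScanBands_eq_find?, pvScanTasks_eq_find?]
  cases (task_rules.map Prod.snd).find? (pvMatch provider) <;> rfl

-- A = first match over the prioritized candidate list C0 ++ C1 ++ C2
theorem A_char (provider : String) (rules : List (String × List (String × List (String × String)))) (preferred_task preferred_band : String) :
    find_model_for_provider_py provider rules preferred_task preferred_band =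
      (match (pvC0 preferred_band ((List.lookup preferred_task rules).getD []) ++
              ((List.lookup preferred_task rules).getD []).map Prod.snd ++
              pvC2 preferred_task rules).find? (pvMatch provider) with
       | some cfg => List.lookup "model" cfg
       | none => List.lookup provider PROVIDER_DEFAULT_MODELS) := by
  simp only [find_model_for_provider_py, pvC0]
  generalize (List.lookup preferred_task rules).getD ([] : List (String × List (String × String))) = task_rules
  cases hlk : List.lookup preferred_band task_rules with
  | none =>
      dsimp only
      rw [pvAfterBand_eq, List.nil_append]
  | some bc =>
      dsimp only
      by_cases hcond : bc ≠ [] ∧ List.lookup "provider" bc = some provider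
      · obtain ⟨hne, hp⟩ := hcond
        have hie : bc.isEmpty = false := by
          cases bc
          · exact absurd rfl hne
          · rfl
        have hpb : pvMatch provider bc = true := by simp [pvMatch, hp]
        rw [if_pos ⟨hne, hp⟩, hie]
        simp [hpb]
      · rw [if_neg hcond]
        have hseg1 : ((if bc.isEmpty then [] else [bc]) : List (List (String × String))).find? (pvMatch provider) = none := by
          by_cases he : bc = []
          · subst he; rfl
          · have hp : ¬ List.lookup "provider" bc = some provider := fun hh => hcond ⟨he, hh⟩
            have hie : bc.isEmpty = false := by
              cases bc
              · exact absurd rfl he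
              · rfl
            simp [hie, pvMatch, hp]
        rw [List.append_assoc, List.find?_append, hseg1, Option.none_or, pvAfterBand_eq]

-- first-match as head of filtered model list
theorem find?_model (provider : String) (d : Option String) (K : List (List (String × String))) :
    (match K.find? (pvMatch provider) with
     | some cfg => List.lookup "model" cfg
     | none => d) = (((K.filter (pvMatch provider)).map pvModel).head?).getD d := by
  induction K with
  | nil => rfl
  | cons c t ih =>
      by_cases h : pvMatch provider c = true
      · simp [h, pvModel]
      · have h' : pvMatch provider c = false := by simpa using h
        simp [h', ih]

-- fold lemmas for the best-priority accumulator
theorem foldl_step_ge (L : List (Nat × Option String)) : ∀ acc, (∀ e ∈ L, acc.1 ≤ e.1) → L.foldl pvStep acc = acc := by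
  induction L with
  | nil => intro acc _; rfl
  | cons e t ih =>
      intro acc h
      have h1 : acc.1 ≤ e.1 := h e (by simp)
      have : pvStep acc e = acc := by simp [pvStep]; omega
      simp only [List.foldl_cons, this]
      exact ih acc (fun x hx => h x (by simp [hx]))

theorem foldl_step_first (e : Nat × Option String) (l1 : List (Nat × Option String)) :
    ∀ (l2 : List (Nat × Option String)) (acc : Nat × Option String), e.1 < acc.1 → (∀ x ∈ l1, e.1 < x.1) → (∀ x ∈ l2, e.1 ≤ x.1) →
      (l1 ++ e :: l2).foldl pvStep acc = e := by
  induction l1 with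
  | nil =>
      intro l2 acc hacc _ h2
      have : pvStep acc e = e := by simp [pvStep]; omega
      simp only [List.nil_append, List.foldl_cons, this]
      exact foldl_step_ge l2 e h2
  | cons x t ih =>
      intro l2 acc hacc h1 h2
      have hx : e.1 < x.1 := h1 x (by simp)
      have hstep : e.1 < (pvStep acc x).1 := by simp only [pvStep]; split <;> omega
      simp only [List.cons_append, List.foldl_cons]
      exact ih l2 (pvStep acc x) hstep (fun y hy => h1 y (by simp [hy])) h2

-- the fold selects the first entry of minimal priority = head of the stable 0/1/2 bucketing
theorem sel (L : List (Nat × Option String)) (hL : ∀ x ∈ L, x.1 < 3) :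
    L.foldl pvStep (3, none) = (pvF 0 L ++ pvF 1 L ++ pvF 2 L).headD (3, none) := by
  cases h0 : pvF 0 L with
  | cons e t =>
      obtain ⟨l1, l2, hsplit, hl1, he, -⟩ := List.filter_eq_cons_iff.mp h0
      have he0 : e.1 = 0 := by simpa using he
      subst hsplit
      rw [foldl_step_first e l1 l2 (3, none) (by simp [he0])
        (fun x hx => by have := hl1 x hx; simp at this; omega)
        (fun x hx => by omega)]
      simp [h0]
  | nil =>
      have hn0 : ∀ x ∈ L, x.1 ≠ 0 := by
        intro x hx
        have := List.filter_eq_nil_iff.mp h0 x hx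
        simpa using this
      cases h1 : pvF 1 L with
      | cons e t =>
          obtain ⟨l1, l2, hsplit, hl1, he, -⟩ := List.filter_eq_cons_iff.mp h1
          have he1 : e.1 = 1 := by simpa using he
          have hmem1 : ∀ x ∈ l1, x ∈ L := by intro x hx; rw [hsplit]; simp [hx]
          have hmem2 : ∀ x ∈ l2, x ∈ L := by intro x hx; rw [hsplit]; simp [hx]
          rw [hsplit, foldl_step_first e l1 l2 (3, none) (by simp [he1])
            (fun x hx => by
              have hne1 : ¬ (x.1 == 1) = true := hl1 x hx
              have hne0 := hn0 x (hmem1 x hx)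
              simp at hne1; omega)
            (fun x hx => by have := hn0 x (hmem2 x hx); omega)]
          simp [h0, h1]
      | nil =>
          have hn1 : ∀ x ∈ L, x.1 ≠ 1 := by
            intro x hx
            have := List.filter_eq_nil_iff.mp h1 x hx
            simpa using this
          cases h2 : pvF 2 L with
          | cons e t =>
              obtain ⟨l1, l2, hsplit, hl1, he, -⟩ := List.filter_eq_cons_iff.mp h2
              have he2 : e.1 = 2 := by simpa using he
              have hmem1 : ∀ x ∈ l1, x ∈ L := by intro x hx; rw [hsplit]; simp [hx]
              have hmem2 : ∀ x ∈ l2, x ∈ L := by intro x hx; rw [hsplit]; simp [hx]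
              rw [hsplit, foldl_step_first e l1 l2 (3, none) (by simp [he2])
                (fun x hx => by
                  have hne2 : ¬ (x.1 == 2) = true := hl1 x hx
                  have := hn0 x (hmem1 x hx); have := hn1 x (hmem1 x hx)
                  have := hL x (hmem1 x hx)
                  simp at hne2; omega)
                (fun x hx => by have := hn0 x (hmem2 x hx); have := hn1 x (hmem2 x hx); omega)]
              simp [h0, h1, h2]
          | nil =>
              have : L = [] := by
                cases hcase : L with
                | nil => rfl
                | cons y t' =>
                    exfalso
                    have hy : y ∈ L := by rw [hcase]; simp
                    have := hn0 y hy
                    have := hn1 y hy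
                    have h2' := List.filter_eq_nil_iff.mp h2 y hy
                    have := hL y hy
                    simp at h2'
                    omega
              rw [this]; rfl

-- every entry has priority < 3
theorem pvL_lt3 (provider preferred_task preferred_band : String) (rules : List (String × List (String × List (String × String)))) :
    ∀ x ∈ pvL provider preferred_task preferred_band rules, x.1 < 3 := by
  intro x hx
  simp only [pvL, List.mem_flatMap, pvEnt, List.mem_filterMap] at hx
  obtain ⟨tb, -, bc, -, hx⟩ := hx
  by_cases h : pvMatch provider bc.2 = true
  · rw [if_pos h] at hx
    have : x.1 = pvPrio preferred_task preferred_band tb.1 bc.1 := by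
      cases hx; rfl
    rw [this]; unfold pvPrio; split <;> [skip; omega]; split <;> omega
  · rw [if_neg h] at hx; cases hx

-- B's fold over rules = fold of pvStep over the flattened entry list
theorem pvEnt_cons (provider preferred_task preferred_band task_name : String) (bc : String × List (String × String)) (t : List (String × List (String × String))) :
    pvEnt provider preferred_task preferred_band task_name (bc :: t) =
      (if pvMatch provider bc.2 = true then [(pvPrio preferred_task preferred_band task_name bc.1, pvModel bc.2)] else []) ++
        pvEnt provider preferred_task preferred_band task_name t := by
  by_cases h : pvMatch provider bc.2 = true <;> simp [pvEnt, List.filterMap_cons, h]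

theorem inner_fold (provider preferred_task preferred_band task_name : String) (bands : List (String × List (String × String))) :
    ∀ acc, bands.foldl (fun acc2 bc =>
      if List.lookup "provider" bc.2 == some provider then
        let prio := pvPrio preferred_task preferred_band task_name bc.1
        if prio < acc2.1 then (prio, List.lookup "model" bc.2) else acc2
      else acc2) acc = (pvEnt provider preferred_task preferred_band task_name bands).foldl pvStep acc := by
  induction bands with
  | nil => intro acc; rfl
  | cons bc t ih =>
      intro acc
      rw [pvEnt_cons]
      by_cases h : pvMatch provider bc.2 = true
      · have hinit : (if List.lookup "provider" bc.2 == some provider then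
            (let prio := pvPrio preferred_task preferred_band task_name bc.1;
             if prio < acc.1 then (prio, List.lookup "model" bc.2) else acc)
          else acc) = pvStep acc (pvPrio preferred_task preferred_band task_name bc.1, pvModel bc.2) := by
          have h' : (List.lookup "provider" bc.2 == some provider) = true := h
          simp [h', pvStep, pvModel]
        rw [if_pos h]
        simp only [List.cons_append, List.nil_append, List.foldl_cons]
        rw [hinit, ih]
      · have h' : (List.lookup "provider" bc.2 == some provider) = false := by
          simpa [pvMatch] using h
        rw [if_neg h, List.nil_append, List.foldl_cons, h']
        simp only [Bool.false_eq_true, if_false]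
        exact ih acc

theorem outer_fold (provider preferred_task preferred_band : String) (rules : List (String × List (String × List (String × String)))) :
    ∀ acc, rules.foldl (fun acc tb =>
      tb.2.foldl (fun acc2 bc =>
        if List.lookup "provider" bc.2 == some provider then
          let prio := pvPrio preferred_task preferred_band tb.1 bc.1
          if prio < acc2.1 then (prio, List.lookup "model" bc.2) else acc2
        else acc2) acc) acc = (pvL provider preferred_task preferred_band rules).foldl pvStep acc := by
  induction rules with
  | nil => intro acc; rfl
  | cons tb t ih =>
      intro acc
      simp only [List.foldl_cons, pvL, List.flatMap_cons, List.foldl_append]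
      rw [inner_fold, ih]
      rfl

-- B = head of the bucketed entry list (model component), else the provider default
theorem headD_model (K : List (Nat × Option String)) (d : Option String) (hK : ∀ x ∈ K, x.1 < 3) :
    (if (K.headD (3, none)).1 < 3 then (K.headD (3, none)).2 else d) = ((K.map Prod.snd).head?).getD d := by
  cases K with
  | nil => simp
  | cons e t =>
      have := hK e (by simp)
      simp [List.headD, this]

theorem B_char (provider : String) (rules : List (String × List (String × List (String × String)))) (preferred_task preferred_band : String) :
    find_model_for_provider_py_alt provider rules preferred_task preferred_band =
      ((((pvF 0 (pvL provider preferred_task preferred_band rules)).map Prod.snd ++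
         (pvF 1 (pvL provider preferred_task preferred_band rules)).map Prod.snd ++
         (pvF 2 (pvL provider preferred_task preferred_band rules)).map Prod.snd).head?).getD
        (List.lookup provider PROVIDER_DEFAULT_MODELS)) := by
  unfold find_model_for_provider_py_alt
  rw [outer_fold, sel _ (pvL_lt3 provider preferred_task preferred_band rules)]
  have hK : ∀ x ∈ pvF 0 (pvL provider preferred_task preferred_band rules) ++
      pvF 1 (pvL provider preferred_task preferred_band rules) ++
      pvF 2 (pvL provider preferred_task preferred_band rules), x.1 < 3 := by
    intro x hx
    simp only [List.mem_append, pvF, List.mem_filter] at hx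
    rcases hx with (⟨hm, -⟩ | ⟨hm, -⟩) | ⟨hm, -⟩ <;>
      exact pvL_lt3 provider preferred_task preferred_band rules x hm
  rw [headD_model _ _ hK, List.map_append, List.map_append]

-- ---- segment identifications ----

theorem ent_map_snd (provider preferred_task preferred_band task_name : String) (bands : List (String × List (String × String))) :
    (pvEnt provider preferred_task preferred_band task_name bands).map Prod.snd = pvGM provider bands := by
  induction bands with
  | nil => rfl
  | cons bc t ih =>
      by_cases h : pvMatch provider bc.2 = true
      · simp [pvEnt, pvGM, h]
        exact ih
      · have h' : pvMatch provider bc.2 = false := by simpa using h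
        simp [pvEnt, pvGM, h']
        exact ih

theorem gm_eq (provider : String) (bands : List (String × List (String × String))) :
    ((bands.map Prod.snd).filter (pvMatch provider)).map pvModel = pvGM provider bands := by
  induction bands with
  | nil => rfl
  | cons bc t ih =>
      by_cases h : pvMatch provider bc.2 = true
      · simp [pvGM, h, ih]
      · have h' : pvMatch provider bc.2 = false := by simpa using h
        simp [pvGM, h', ih]

-- pvF distributes over the flatMap of pvL
theorem pvF_flatMap (i : Nat) (provider preferred_task preferred_band : String) (rules : List (String × List (String × List (String × String)))) :
    pvF i (pvL provider preferred_task preferred_band rules) =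
      rules.flatMap (fun tb => pvF i (pvEnt provider preferred_task preferred_band tb.1 tb.2)) := by
  induction rules with
  | nil => rfl
  | cons tb t ih => simp [pvL, pvF, List.flatMap_cons, List.filter_append] at ih ⊢; rw [ih]

-- entries of a non-preferred task all have priority 2
theorem ent_other (provider preferred_task preferred_band task_name : String) (bands : List (String × List (String × String)))
    (h : (task_name == preferred_task) = false) :
    (pvF 0 (pvEnt provider preferred_task preferred_band task_name bands) = [] ∧
     pvF 1 (pvEnt provider preferred_task preferred_band task_name bands) = [] ∧
     pvF 2 (pvEnt provider preferred_task preferred_band task_name bands) = pvEnt provider preferred_task preferred_band task_name bands) := by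
  have hp : ∀ x ∈ pvEnt provider preferred_task preferred_band task_name bands, x.1 = 2 := by
    intro x hx
    simp only [pvEnt, List.mem_filterMap] at hx
    obtain ⟨bc, -, hx⟩ := hx
    by_cases hm : pvMatch provider bc.2 = true
    · rw [if_pos hm] at hx; cases hx; simp [pvPrio, h]
    · rw [if_neg hm] at hx; cases hx
  refine ⟨List.filter_eq_nil_iff.mpr ?_, List.filter_eq_nil_iff.mpr ?_, List.filter_eq_self.mpr ?_⟩
  · intro x hx; have := hp x hx; simp [this]
  · intro x hx; have := hp x hx; simp [this]
  · intro x hx; have := hp x hx; simp [this]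

-- lookup = none means no key matches
theorem lookup_none_keys {β : Type} (k : String) (l : List (String × β)) (h : List.lookup k l = none) :
    ∀ x ∈ l, (x.1 == k) = false := by
  induction l with
  | nil => intro x hx; cases hx
  | cons p t ih =>
      intro x hx
      cases hk : (k == p.1) with
      | true =>
          simp only [List.lookup, hk] at h
          cases h
      | false =>
          simp only [List.lookup, hk] at h
          rcases List.mem_cons.mp hx with rfl | hx'
          · simp at hk ⊢; exact fun hh => hk hh.symm
          · exact ih h x hx'

-- lookup = some splits the list at the first occurrence of the key
theorem lookup_split {β : Type} (k : String) (v : β) (l : List (String × β)) (h : List.lookup k l = some v) :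
    ∃ l1 l2, l = l1 ++ (k, v) :: l2 ∧ ∀ x ∈ l1, (x.1 == k) = false := by
  induction l with
  | nil => cases h
  | cons p t ih =>
      cases hk : (k == p.1) with
      | true =>
          simp only [List.lookup, hk] at h
          cases h
          have hpk : p.1 = k := by simpa using (beq_iff_eq.mp hk).symm
          refine ⟨[], t, ?_, by intro x hx; cases hx⟩
          obtain ⟨p1, p2⟩ := p
          simp at hpk
          simp [hpk]
      | false =>
          simp only [List.lookup, hk] at h
          obtain ⟨l1, l2, hsplit, hl1⟩ := ih h
          refine ⟨p :: l1, l2, by rw [hsplit]; rfl, ?_⟩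
          intro x hx
          rcases List.mem_cons.mp hx with rfl | hx'
          · simp at hk ⊢; exact fun hh => hk hh.symm
          · exact hl1 x hx'

-- flatMap collapses to the single non-vanishing group
theorem flatMap_single {α β : Type} (f : α → List β) (m : α) (l1 l2 : List α)
    (h1 : ∀ x ∈ l1, f x = []) (h2 : ∀ x ∈ l2, f x = []) :
    (l1 ++ m :: l2).flatMap f = f m := by
  rw [List.flatMap_append, List.flatMap_cons]
  have e1 : l1.flatMap f = [] := List.flatMap_eq_nil_iff.mpr h1
  have e2 : l2.flatMap f = [] := List.flatMap_eq_nil_iff.mpr h2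
  rw [e1, e2]; simp

-- filtered flatMap drops the groups whose key is the preferred task
theorem pvC2_matched (provider preferred_task : String) (rules : List (String × List (String × List (String × String)))) :
    ((pvC2 preferred_task rules).filter (pvMatch provider)).map pvModel =
      rules.flatMap (fun tb => if (tb.1 == preferred_task) = true then [] else pvGM provider tb.2) := by
  induction rules with
  | nil => rfl
  | cons tb t ih =>
      by_cases h : (tb.1 == preferred_task) = true
      · have hb : (tb.1 != preferred_task) = false := by simp [bne, h]
        simp only [pvC2, List.filter_cons, hb, Bool.false_eq_true, if_false, List.flatMap_cons, if_pos h, List.nil_append]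
        exact ih
      · have hb : (tb.1 != preferred_task) = true := by simp [bne] at h ⊢; simpa using h
        simp only [pvC2, List.filter_cons, hb, if_true, List.flatMap_cons, List.filter_append, List.map_append, if_neg h]
        rw [gm_eq]
        exact congrArg _ ih

-- priority bucket helpers
theorem pvF_eq_nil_of (i : Nat) (l : List (Nat × Option String)) (h : ∀ x ∈ l, x.1 ≠ i) : pvF i l = [] := by
  apply List.filter_eq_nil_iff.mpr
  intro x hx; simpa using h x hx

theorem pvF_eq_self_of (i : Nat) (l : List (Nat × Option String)) (h : ∀ x ∈ l, x.1 = i) : pvF i l = l := by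
  apply List.filter_eq_self.mpr
  intro x hx; simpa using h x hx

theorem ent_prio_mem (provider preferred_task preferred_band task_name : String) (bands : List (String × List (String × String)))
    (x : Nat × Option String) (hx : x ∈ pvEnt provider preferred_task preferred_band task_name bands) :
    ∃ bc ∈ bands, pvMatch provider bc.2 = true ∧ x = (pvPrio preferred_task preferred_band task_name bc.1, pvModel bc.2) := by
  simp only [pvEnt, List.mem_filterMap] at hx
  obtain ⟨bc, hm, hx⟩ := hx
  by_cases h : pvMatch provider bc.2 = true
  · rw [if_pos h] at hx; exact ⟨bc, hm, h, by cases hx; rfl⟩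
  · rw [if_neg h] at hx; cases hx

theorem ent_pt_nil2 (provider preferred_task preferred_band task_name : String) (bands : List (String × List (String × String)))
    (h : (task_name == preferred_task) = true) :
    pvF 2 (pvEnt provider preferred_task preferred_band task_name bands) = [] := by
  apply pvF_eq_nil_of
  intro x hx
  obtain ⟨bc, -, -, rfl⟩ := ent_prio_mem provider preferred_task preferred_band task_name bands x hx
  simp only [pvPrio, h, if_true]
  split <;> omega

-- B's priority-2 bucket = A's phase-3 matched models (no Nodup needed)
theorem seg2_eq (provider preferred_task preferred_band : String) (rules : List (String × List (String × List (String × String)))) :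
    (pvF 2 (pvL provider preferred_task preferred_band rules)).map Prod.snd =
      ((pvC2 preferred_task rules).filter (pvMatch provider)).map pvModel := by
  rw [pvC2_matched, pvF_flatMap]
  induction rules with
  | nil => rfl
  | cons tb t ih =>
      rw [List.flatMap_cons, List.flatMap_cons, List.map_append, ih]
      congr 1
      by_cases h : (tb.1 == preferred_task) = true
      · rw [ent_pt_nil2 provider preferred_task preferred_band tb.1 tb.2 h, if_pos h]; rfl
      · have h' : (tb.1 == preferred_task) = false := by simpa using h
        rw [if_neg h, (ent_other provider preferred_task preferred_band tb.1 tb.2 h').2.2, ent_map_snd]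

-- entries of the preferred task when no band equals the preferred band: all priority 1
theorem ent_pref_nopb (provider preferred_task preferred_band : String) (bands : List (String × List (String × String)))
    (hb : ∀ bc ∈ bands, (bc.1 == preferred_band) = false) :
    pvF 0 (pvEnt provider preferred_task preferred_band preferred_task bands) = [] ∧
    pvF 1 (pvEnt provider preferred_task preferred_band preferred_task bands) =
      pvEnt provider preferred_task preferred_band preferred_task bands := by
  have hp : ∀ x ∈ pvEnt provider preferred_task preferred_band preferred_task bands, x.1 = 1 := by
    intro x hx
    obtain ⟨bc, hm, -, rfl⟩ := ent_prio_mem provider preferred_task preferred_band preferred_task bands x hx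
    simp [pvPrio, hb bc hm]
  exact ⟨pvF_eq_nil_of 0 _ (fun x hx => by rw [hp x hx]; omega), pvF_eq_self_of 1 _ hp⟩

theorem pvF_append (i : Nat) (a b : List (Nat × Option String)) : pvF i (a ++ b) = pvF i a ++ pvF i b := by
  simp [pvF, List.filter_append]

theorem ent_append (provider preferred_task preferred_band task_name : String) (b1 b2 : List (String × List (String × String))) :
    pvEnt provider preferred_task preferred_band task_name (b1 ++ b2) =
      pvEnt provider preferred_task preferred_band task_name b1 ++ pvEnt provider preferred_task preferred_band task_name b2 := by
  simp [pvEnt, List.filterMap_append]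

-- the head of the first two buckets equals the head of A's first two matched segments
theorem seg01 (provider preferred_task preferred_band : String) (rules : List (String × List (String × List (String × String))))
    (hpre : Pre_find_model_for_provider_py provider rules preferred_task preferred_band) :
    ((pvF 0 (pvL provider preferred_task preferred_band rules)).map Prod.snd ++
     (pvF 1 (pvL provider preferred_task preferred_band rules)).map Prod.snd).head? =
    ((((pvC0 preferred_band ((List.lookup preferred_task rules).getD [])).filter (pvMatch provider)).map pvModel) ++
     ((((List.lookup preferred_task rules).getD []).map Prod.snd).filter (pvMatch provider)).map pvModel).head? := by
  obtain ⟨hk, hb⟩ := hpre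
  cases hpt : List.lookup preferred_task rules with
  | none =>
      have hall : ∀ tb ∈ rules, (tb.1 == preferred_task) = false :=
        lookup_none_keys preferred_task rules hpt
      have h0 : pvF 0 (pvL provider preferred_task preferred_band rules) = [] := by
        rw [pvF_flatMap]
        exact List.flatMap_eq_nil_iff.mpr (fun tb htb => (ent_other provider preferred_task preferred_band tb.1 tb.2 (hall tb htb)).1)
      have h1 : pvF 1 (pvL provider preferred_task preferred_band rules) = [] := by
        rw [pvF_flatMap]
        exact List.flatMap_eq_nil_iff.mpr (fun tb htb => (ent_other provider preferred_task preferred_band tb.1 tb.2 (hall tb htb)).2.1)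
      rw [h0, h1]; rfl
  | some tr =>
      obtain ⟨r1, r2, hsplit, hr1⟩ := lookup_split preferred_task tr rules hpt
      have hr2 : ∀ x ∈ r2, (x.1 == preferred_task) = false := by
        intro x hx
        have hnd : ((r1 ++ (preferred_task, tr) :: r2).map Prod.fst).Nodup := hsplit ▸ hk
        rw [List.map_append, List.map_cons] at hnd
        have hnd2 : (preferred_task :: r2.map Prod.fst).Nodup := hnd.of_append_right
        have : preferred_task ∉ r2.map Prod.fst := (List.nodup_cons.mp hnd2).1
        simp only [List.mem_map] at this
        have hne : x.1 ≠ preferred_task := fun hh => this ⟨x, hx, hh⟩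
        simpa using hne
      have hmem : (preferred_task, tr) ∈ rules := by rw [hsplit]; simp
      have htrnd : (tr.map Prod.fst).Nodup := hb (preferred_task, tr) hmem
      have hF0 : pvF 0 (pvL provider preferred_task preferred_band rules) =
          pvF 0 (pvEnt provider preferred_task preferred_band preferred_task tr) := by
        rw [pvF_flatMap, hsplit]
        exact flatMap_single _ (preferred_task, tr) r1 r2
          (fun x hx => (ent_other provider preferred_task preferred_band x.1 x.2 (hr1 x hx)).1)
          (fun x hx => (ent_other provider preferred_task preferred_band x.1 x.2 (hr2 x hx)).1)
      have hF1 : pvF 1 (pvL provider preferred_task preferred_band rules) =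
          pvF 1 (pvEnt provider preferred_task preferred_band preferred_task tr) := by
        rw [pvF_flatMap, hsplit]
        exact flatMap_single _ (preferred_task, tr) r1 r2
          (fun x hx => (ent_other provider preferred_task preferred_band x.1 x.2 (hr1 x hx)).2.1)
          (fun x hx => (ent_other provider preferred_task preferred_band x.1 x.2 (hr2 x hx)).2.1)
      rw [hF0, hF1, Option.getD_some]
      cases hpb : List.lookup preferred_band tr with
      | none =>
          have hnb : ∀ bc ∈ tr, (bc.1 == preferred_band) = false :=
            lookup_none_keys preferred_band tr hpb
          obtain ⟨h0, h1⟩ := ent_pref_nopb provider preferred_task preferred_band tr hnb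
          rw [h0, h1, ent_map_snd, pvC0, hpb]
          rw [gm_eq]
          rfl
      | some bc =>
          obtain ⟨t1, t2, htsplit, ht1⟩ := lookup_split preferred_band bc tr hpb
          have ht2 : ∀ x ∈ t2, (x.1 == preferred_band) = false := by
            intro x hx
            have hnd : ((t1 ++ (preferred_band, bc) :: t2).map Prod.fst).Nodup := htsplit ▸ htrnd
            rw [List.map_append, List.map_cons] at hnd
            have hnd2 : (preferred_band :: t2.map Prod.fst).Nodup := hnd.of_append_right
            have : preferred_band ∉ t2.map Prod.fst := (List.nodup_cons.mp hnd2).1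
            simp only [List.mem_map] at this
            have hne : x.1 ≠ preferred_band := fun hh => this ⟨x, hx, hh⟩
            simpa using hne
          obtain ⟨h0t1, h1t1⟩ := ent_pref_nopb provider preferred_task preferred_band t1 ht1
          obtain ⟨h0t2, h1t2⟩ := ent_pref_nopb provider preferred_task preferred_band t2 ht2
          have hE : pvEnt provider preferred_task preferred_band preferred_task tr =
              pvEnt provider preferred_task preferred_band preferred_task t1 ++
              (pvEnt provider preferred_task preferred_band preferred_task [(preferred_band, bc)] ++
               pvEnt provider preferred_task preferred_band preferred_task t2) := by
            rw [htsplit, show (preferred_band, bc) :: t2 = [(preferred_band, bc)] ++ t2 from rfl,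
              ent_append, ent_append]
          by_cases hm : pvMatch provider bc = true
          · have hbcne : bc ≠ [] := by
              intro hh; rw [hh] at hm; simp [pvMatch] at hm
            have hie : bc.isEmpty = false := by
              cases bc
              · exact absurd rfl hbcne
              · rfl
            have hmid : pvEnt provider preferred_task preferred_band preferred_task [(preferred_band, bc)] =
                [(0, pvModel bc)] := by
              simp [pvEnt, hm, pvPrio]
            have hF0E : pvF 0 (pvEnt provider preferred_task preferred_band preferred_task tr) =
                [(0, pvModel bc)] := by
              rw [hE, hmid, pvF_append, pvF_append, h0t1, h0t2]
              rfl
            rw [hF0E]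
            simp [pvC0, hpb, hie, hm]
          · have hm' : pvMatch provider bc = false := by simpa using hm
            have hmid : pvEnt provider preferred_task preferred_band preferred_task [(preferred_band, bc)] = [] := by
              simp [pvEnt, hm']
            have hF0E : pvF 0 (pvEnt provider preferred_task preferred_band preferred_task tr) = [] := by
              rw [hE, hmid, pvF_append, pvF_append, h0t1, h0t2]
              rfl
            have hF1E : pvF 1 (pvEnt provider preferred_task preferred_band preferred_task tr) =
                pvEnt provider preferred_task preferred_band preferred_task t1 ++
                pvEnt provider preferred_task preferred_band preferred_task t2 := by
              rw [hE, hmid, pvF_append, pvF_append, h1t1, h1t2]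
              rfl
            have hC0 : (pvC0 preferred_band tr).filter (pvMatch provider) = [] := by
              simp only [pvC0, hpb]
              by_cases he : bc.isEmpty = true
              · rw [if_pos he]; rfl
              · rw [if_neg he]; simp [hm']
            have hY1 : ((tr.map Prod.snd).filter (pvMatch provider)).map pvModel =
                pvGM provider t1 ++ pvGM provider t2 := by
              rw [gm_eq, htsplit]
              simp [pvGM, List.filterMap_append, hm']
            rw [hF0E, hF1E, hC0, hY1, List.map_append, ent_map_snd, ent_map_snd]
            simp

-- ===== VERDICT (by name: the statement is the Claim_ definition above) =====
theorem find_model_for_provider_py_spec : Claim_equal_find_model_for_provider_py := by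
  intro provider rules preferred_task preferred_band _ hpre
  unfold Spec_find_model_for_provider_py
  rw [A_char, find?_model, B_char]
  rw [List.filter_append, List.filter_append, List.map_append, List.map_append]
  have h2 := seg2_eq provider preferred_task preferred_band rules
  have h01 : ((pvF 0 (pvL provider preferred_task preferred_band rules)).map Prod.snd).head?.or
      ((pvF 1 (pvL provider preferred_task preferred_band rules)).map Prod.snd).head? =
      (((pvC0 preferred_band ((List.lookup preferred_task rules).getD [])).filter (pvMatch provider)).map pvModel).head?.or
      (((((List.lookup preferred_task rules).getD []).map Prod.snd).filter (pvMatch provider)).map pvModel).head? := by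
    have := seg01 provider preferred_task preferred_band rules hpre
    simpa [List.head?_append] using this
  rw [← h2, List.head?_append, List.head?_append, ← h01, Option.or_assoc, ← List.head?_append, ← List.head?_append]
  rw [List.append_assoc]
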